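-- pv_equiv track=rewrite | github.com/mikietechie/c-plus-plus-mcs | c_lesson_1/task_4/main.py | function
-- ===== SOURCE A (Python) =====
-- def function(l: int, r: int, d: int) -> str:
--     """
--     Prints all numbers divisible by D
--     """
--     output = ""
--     counter = l
--     while counter <= r:
--         remainder = counter % d
--         if remainder == 0:
--             output = f"{output} {counter}"
--         counter += 1
--     return output.strip()
-- ===== SOURCE B (Python) =====
-- def function(l: int, r: int, d: int) -> str:
--     """
--     Prints all numbers divisible by D
--     """
--     if r < l:
--         return ""
--     step = abs(d)
--     start = l + (-l) % step
--     return " ".join(str(k) for k in range(start, r + 1, step))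
-- ===== Notes on version B (the rewrite author's own statement) =====
-- stated objective: faster
-- what changed: A scans every integer in [l, r] testing divisibility with %; B computes the first multiple of d at or above l and iterates only over the multiples with step abs(d), joining their decimal strings.
import Mathlib
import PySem

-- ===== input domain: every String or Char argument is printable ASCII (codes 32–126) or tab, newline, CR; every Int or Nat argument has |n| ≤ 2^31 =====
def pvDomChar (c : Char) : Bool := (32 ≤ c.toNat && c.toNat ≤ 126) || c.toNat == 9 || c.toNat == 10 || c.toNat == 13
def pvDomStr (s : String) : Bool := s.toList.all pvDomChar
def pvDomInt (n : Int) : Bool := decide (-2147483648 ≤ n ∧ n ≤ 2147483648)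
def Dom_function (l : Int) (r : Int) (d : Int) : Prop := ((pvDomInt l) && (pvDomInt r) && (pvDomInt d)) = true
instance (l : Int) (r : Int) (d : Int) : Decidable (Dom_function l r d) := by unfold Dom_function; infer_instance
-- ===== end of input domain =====

-- B replaces A's per-integer scan of [l, r] by stepping directly through the multiples of |d|
-- (first multiple of d at or above l, step |d|), joining their decimal strings with " ": an
-- asymptotically smaller loop, O((r-l)/|d|) instead of O(r-l).

-- ===== PORT A =====
def function (l : Int) (r : Int) (d : Int) : String :=
  let output : String :=
    (PySem.List.pyRange l (r + 1) 1).foldl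
      (fun output counter =>
        let remainder := PySem.Int.mod counter d
        if remainder == 0 then output ++ " " ++ PySem.Int.toStr counter else output) ""
  PySem.Str.strip output

-- ===== PORT B =====
def function_alt (l : Int) (r : Int) (d : Int) : String :=
  if r < l then ""
  else
    let step : Int := |d|
    let start : Int := l + PySem.Int.mod (-l) step
    PySem.Str.join " " ((PySem.List.pyRange start (r + 1) step).map PySem.Int.toStr)

-- ===== PRECONDITION & SPEC =====
-- Pre_ excludes exactly the inputs where Python A raises ZeroDivisionError: d = 0 with a
-- non-empty range l ≤ r ('counter % d' is evaluated); B raises there too (abs(d) = 0 step).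
def Pre_function (l : Int) (r : Int) (d : Int) : Prop := d ≠ 0 ∨ r < l
instance (l : Int) (r : Int) (d : Int) : Decidable (Pre_function l r d) := by unfold Pre_function; infer_instance
def pvWitness_function : Int × Int × Int := (1, 10, 3)
def Spec_function (l : Int) (r : Int) (d : Int) (out : String) : Prop := out = function_alt l r d
instance (l : Int) (r : Int) (d : Int) (out : String) : Decidable (Spec_function l r d out) := by unfold Spec_function; infer_instance

-- ===== CLAIM =====
def Claim_equal_function : Prop := ∀ (l : Int) (r : Int) (d : Int), Dom_function l r d → Pre_function l r d → Spec_function l r d (function l r d)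

-- ===== LEMMAS AND PROOFS =====
theorem digitChar_nospace (k : Nat) (h : k < 16) : PySem.Chars.isspace k.digitChar = false := by
  interval_cases k <;> decide

theorem core_nospace : ∀ (fuel n : Nat) (ds : List Char),
    (∀ c ∈ ds, PySem.Chars.isspace c = false) →
    ∀ c ∈ Nat.toDigitsCore 10 fuel n ds, PySem.Chars.isspace c = false := by
  intro fuel
  induction fuel with
  | zero => intro n ds h c hc; exact h c hc
  | succ f ih =>
      intro n ds h c hc
      rw [Nat.toDigitsCore] at hc
      have hds : ∀ c ∈ (n % 10).digitChar :: ds, PySem.Chars.isspace c = false := by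
        intro c hc
        rcases List.mem_cons.mp hc with h1 | h1
        · subst h1; exact digitChar_nospace _ (by omega)
        · exact h c h1
      split at hc
      · exact hds c hc
      · exact ih (n / 10) _ hds c hc

theorem core_ne_nil : ∀ (fuel n : Nat) (ds : List Char),
    Nat.toDigitsCore 10 fuel n ds = [] → ds = [] := by
  intro fuel
  induction fuel with
  | zero => intro n ds h; exact h
  | succ f ih =>
      intro n ds h
      rw [Nat.toDigitsCore] at h
      split at h
      · exact absurd h (by simp)
      · exact absurd (ih _ _ h) (by simp)

theorem toDigits_ne_nil (k : Nat) : Nat.toDigits 10 k ≠ [] := by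
  intro h
  rw [Nat.toDigits, Nat.toDigitsCore] at h
  split at h
  · exact absurd h (by simp)
  · exact absurd (core_ne_nil _ _ _ h) (by simp)

theorem toChars_ne_nil (n : Int) : PySem.Int.toChars n ≠ [] := by
  unfold PySem.Int.toChars
  split
  · simp
  · exact toDigits_ne_nil _

theorem toChars_nospace (n : Int) : ∀ c ∈ PySem.Int.toChars n, PySem.Chars.isspace c = false := by
  unfold PySem.Int.toChars
  have hd : ∀ (k : Nat), ∀ c ∈ Nat.toDigits 10 k, PySem.Chars.isspace c = false := by
    intro k c hc
    exact core_nospace _ _ [] (by simp) c hc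
  split
  · intro c hc
    rcases List.mem_cons.mp hc with h1 | h1
    · subst h1; decide
    · exact hd _ c h1
  · exact hd _

theorem rstrip_eq_self (cs : List Char)
    (h : ∀ c, cs.getLast? = some c → PySem.Chars.isspace c = false) :
    PySem.Chars.rstrip cs = cs := by
  cases hrev : cs.reverse with
  | nil =>
      have : cs = [] := by simpa using congrArg List.reverse hrev
      simp [PySem.Chars.rstrip, this]
  | cons c t =>
      have hl : cs.getLast? = some c := by
        rw [← List.head?_reverse, hrev]; rfl
      unfold PySem.Chars.rstrip
      rw [hrev, List.dropWhile_cons_of_neg (by simp [h c hl]), ← hrev, List.reverse_reverse]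

theorem inter_eq : ∀ (rest : List (List Char)) (c0 : List Char),
    List.intercalate [' '] (c0 :: rest) = c0 ++ rest.flatMap (fun cs => ' ' :: cs) := by
  intro rest
  induction rest with
  | nil => intro c0; simp [List.intercalate]
  | cons y t ih =>
      intro c0
      have h1 : List.intercalate [' '] (c0 :: y :: t) = c0 ++ [' '] ++ List.intercalate [' '] (y :: t) := by
        simp [List.intercalate, List.intersperse]
      rw [h1, ih, List.flatMap_cons]
      simp

theorem last_ns : ∀ (M : List (List Char)) (c0 : List Char), c0 ≠ [] →
    (∀ c, c0.getLast? = some c → PySem.Chars.isspace c = false) →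
    (∀ cs ∈ M, cs ≠ [] ∧ ∀ c ∈ cs, PySem.Chars.isspace c = false) →
    ∀ c, (c0 ++ M.flatMap (fun cs => ' ' :: cs)).getLast? = some c → PySem.Chars.isspace c = false := by
  intro M
  induction M with
  | nil => intro c0 h0 hlast _ c hc; simp at hc; exact hlast c hc
  | cons cs rest ih =>
      intro c0 h0 hlast hM c hc
      have hcs := hM cs (by simp)
      have hne : (' ' :: cs) ≠ [] := by simp
      have hlast' : ∀ c, (' ' :: cs).getLast? = some c → PySem.Chars.isspace c = false := by
        intro c h
        cases hcse : cs with
        | nil => exact absurd hcse hcs.1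
        | cons a t =>
            subst hcse
            rw [show (' ' :: a :: t) = [' '] ++ (a :: t) by rfl,
              List.getLast?_append_of_ne_nil _ (by simp)] at h
            exact hcs.2 c (List.mem_of_getLast? h)
      rw [List.flatMap_cons] at hc
      by_cases hr : rest.flatMap (fun cs => ' ' :: cs) = []
      · rw [hr, List.append_nil, List.getLast?_append_of_ne_nil _ hne] at hc
        exact hlast' c hc
      · rw [← List.append_assoc, List.getLast?_append_of_ne_nil _ hr] at hc
        exact ih (' ' :: cs) hne hlast' (fun x hx => hM x (List.mem_cons_of_mem _ hx)) c
          (by rw [List.getLast?_append_of_ne_nil _ hr]; exact hc)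

theorem strip_body (M : List (List Char))
    (h : ∀ cs ∈ M, cs ≠ [] ∧ ∀ c ∈ cs, PySem.Chars.isspace c = false) :
    PySem.Chars.strip (M.flatMap (fun cs => ' ' :: cs)) = List.intercalate [' '] M := by
  cases M with
  | nil => rfl
  | cons c0 rest =>
      have hc0 := h c0 (by simp)
      obtain ⟨ch, c0t, rfl⟩ : ∃ ch t, c0 = ch :: t := by
        cases c0 with
        | nil => exact absurd rfl hc0.1
        | cons a t => exact ⟨a, t, rfl⟩
      have hrest : ∀ cs ∈ rest, cs ≠ [] ∧ ∀ c ∈ cs, PySem.Chars.isspace c = false :=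
        fun x hx => h x (List.mem_cons_of_mem _ hx)
      unfold PySem.Chars.strip PySem.Chars.lstrip
      have hsh : (' ' :: ch :: c0t) ++ rest.flatMap (fun cs => ' ' :: cs)
          = ' ' :: ch :: (c0t ++ rest.flatMap (fun cs => ' ' :: cs)) := by simp
      rw [List.flatMap_cons, hsh,
        List.dropWhile_cons_of_pos (by decide),
        List.dropWhile_cons_of_neg (by simp [hc0.2 ch (by simp)]),
        ← List.cons_append,
        rstrip_eq_self _ (last_ns rest (ch :: c0t) (by simp)
          (fun c hc => hc0.2 c (List.mem_of_getLast? hc)) hrest),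
        inter_eq]

theorem loopA (d : Int) : ∀ (L : List Int) (acc : String),
    (L.foldl (fun out c =>
      if PySem.Int.mod c d == 0 then out ++ " " ++ PySem.Int.toStr c else out) acc).toList
    = acc.toList ++ (L.filter (fun c => PySem.Int.mod c d == 0)).flatMap
        (fun k => ' ' :: PySem.Int.toChars k) := by
  intro L
  induction L with
  | nil => intro acc; simp
  | cons x t ih =>
      intro acc
      by_cases hx : (PySem.Int.mod x d == 0) = true
      · rw [List.foldl_cons, if_pos hx, List.filter_cons, if_pos hx, List.flatMap_cons, ih]
        simp [PySem.Int.toList_toStr]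
      · rw [List.foldl_cons, if_neg hx, List.filter_cons, if_neg hx]
        exact ih acc

theorem range_filter_eq (l r d : Int) (hd : d ≠ 0) :
    (PySem.List.pyRange l (r + 1) 1).filter (fun x => PySem.Int.mod x d == 0)
    = PySem.List.pyRange (l + PySem.Int.mod (-l) |d|) (r + 1) |d| := by
  have hs : (0 : Int) < |d| := abs_pos.mpr hd
  have hmod : PySem.Int.mod (-l) |d| = (-l) % |d| := PySem.Int.mod_eq_emod_of_pos hs
  have hm0 : 0 ≤ PySem.Int.mod (-l) |d| := by rw [hmod]; exact Int.emod_nonneg _ (ne_of_gt hs)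
  have hms : PySem.Int.mod (-l) |d| < |d| := by rw [hmod]; exact Int.emod_lt_of_pos _ hs
  have hdvd_start : |d| ∣ l + PySem.Int.mod (-l) |d| := by
    rw [hmod, Int.emod_def]
    exact ⟨-((-l) / |d|), by ring⟩
  have hmem : ∀ x : Int,
      x ∈ (PySem.List.pyRange l (r + 1) 1).filter (fun x => PySem.Int.mod x d == 0) ↔
      x ∈ PySem.List.pyRange (l + PySem.Int.mod (-l) |d|) (r + 1) |d| := by
    intro x
    rw [List.mem_filter, PySem.List.mem_pyRange_one, PySem.List.mem_pyRange_iff_of_pos hs]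
    constructor
    · rintro ⟨⟨hlx, hxr⟩, hpx⟩
      have hdx : d ∣ x := (PySem.Int.mod_eq_zero_iff_dvd x d).mp (by simpa using hpx)
      have hsx : |d| ∣ x := (abs_dvd d x).mpr hdx
      have hsub : |d| ∣ x - (l + PySem.Int.mod (-l) |d|) := dvd_sub hsx hdvd_start
      obtain ⟨t, ht⟩ := hsub
      have htpos : 0 ≤ t := by
        by_contra hneg
        have h1 : t ≤ -1 := by omega
        have h2 : |d| * t ≤ |d| * (-1) := mul_le_mul_of_nonneg_left h1 hs.le
        have h3 : |d| * (-1) = -|d| := by ring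
        linarith
      have h4 : 0 ≤ |d| * t := mul_nonneg hs.le htpos
      exact ⟨by linarith, hxr, ⟨t, ht⟩⟩
    · rintro ⟨hstart, hxr, hsub⟩
      have hsx : |d| ∣ x := by
        have h5 := dvd_add hsub hdvd_start
        simpa using h5
      refine ⟨⟨by linarith, hxr⟩, ?_⟩
      have hdx : d ∣ x := (abs_dvd d x).mp hsx
      simpa using (PySem.Int.mod_eq_zero_iff_dvd x d).mpr hdx
  have hpw1 : List.Pairwise (· < ·)
      ((PySem.List.pyRange l (r + 1) 1).filter (fun x => PySem.Int.mod x d == 0)) :=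
    List.Pairwise.filter _ (PySem.List.pairwise_lt_pyRange_one l (r + 1))
  have hpw2 : List.Pairwise (· < ·)
      (PySem.List.pyRange (l + PySem.Int.mod (-l) |d|) (r + 1) |d|) := by
    rw [PySem.List.pyRange_of_pos _ _ hs]
    refine List.Pairwise.map _ ?_ List.pairwise_lt_range
    intro a b hab
    have h6 : |d| * (a : Int) < |d| * (b : Int) :=
      mul_lt_mul_of_pos_left (by exact_mod_cast hab) hs
    linarith
  exact PySem.List.eq_of_perm_of_pairwise_le
    ((List.perm_ext_iff_of_nodup (hpw1.imp ne_of_lt) (hpw2.imp ne_of_lt)).mpr hmem)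
    (hpw1.imp le_of_lt) (hpw2.imp le_of_lt)

-- ===== VERDICT =====
theorem function_spec : Claim_equal_function := by
  intro l r d _ hpre
  unfold Spec_function function function_alt
  by_cases hrl : r < l
  · rw [if_pos hrl]
    apply String.toList_inj.mp
    simp [PySem.List.pyRange_one_eq_nil (by omega : r + 1 ≤ l), PySem.Str.toList_strip]
    decide
  · have hd : d ≠ 0 := by rcases hpre with h | h; exact h; omega
    rw [if_neg hrl]
    apply String.toList_inj.mp
    rw [PySem.Str.toList_strip, PySem.Str.toList_join]
    simp only [loopA d]
    rw [range_filter_eq l r d hd]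
    have hM : ∀ cs ∈ (PySem.List.pyRange (l + PySem.Int.mod (-l) |d|) (r + 1) |d|).map PySem.Int.toChars,
        cs ≠ [] ∧ ∀ c ∈ cs, PySem.Chars.isspace c = false := by
      intro cs hcs
      obtain ⟨k, _, rfl⟩ := List.mem_map.mp hcs
      exact ⟨toChars_ne_nil k, toChars_nospace k⟩
    have := strip_body _ hM
    simp only [List.flatMap_map] at this
    rw [show String.toList "" = [] from rfl] at *
    simp only [List.nil_append]
    rw [this]
    simp only [PySem.Chars.join, List.map_map]
    rw [show " ".toList = [' '] from rfl]
    simp [Function.comp_def, PySem.Int.toList_toStr]
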